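-- pv_equiv track=rewrite | github.com/anvar-front/Algorithms | Saliev/functions.py | key_to_matrix
-- ===== SOURCE A (Python) =====
-- def key_to_matrix(key_text, key_length):    # Ключ текст -> Матрица
--     key_text = key_text[:pow(key_length, 2)]
--     matrix_key = []
--     sr = []
--     for i in key_text.upper():
--         sr.append(ord(i) - 65)
--         if len(sr) == key_length:
--             matrix_key.append(sr)
--             sr = []
--     return matrix_key
-- ===== SOURCE B (Python) =====
-- def key_to_matrix(key_text, key_length):
--     if key_length <= 0:
--         return []
--     codes = [ord(c) - 65 for c in key_text[:key_length ** 2].upper()]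
--     return [codes[i:i + key_length]
--             for i in range(0, len(codes) - key_length + 1, key_length)]
-- ===== Notes on version B (the rewrite author's own statement) =====
-- stated objective: alternative
-- what changed: A interleaves accumulate-and-flush in one loop; B first maps all characters to codes in one pass and then reshapes the flat code list into length-key_length rows with a separate stride-key_length slicing pass (degenerate key_length <= 0 returns [] directly).
import Mathlib
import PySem

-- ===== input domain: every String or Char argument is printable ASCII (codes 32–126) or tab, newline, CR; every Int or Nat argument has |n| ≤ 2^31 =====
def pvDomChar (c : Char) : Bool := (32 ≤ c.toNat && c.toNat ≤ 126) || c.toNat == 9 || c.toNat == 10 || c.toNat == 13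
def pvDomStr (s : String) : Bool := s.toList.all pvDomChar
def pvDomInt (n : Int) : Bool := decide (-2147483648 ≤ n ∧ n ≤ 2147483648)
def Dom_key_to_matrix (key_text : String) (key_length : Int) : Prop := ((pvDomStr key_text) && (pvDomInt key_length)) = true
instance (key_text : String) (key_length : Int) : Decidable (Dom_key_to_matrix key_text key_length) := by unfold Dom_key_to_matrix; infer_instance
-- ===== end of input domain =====

-- B maps the truncated key to a flat code list first and then reshapes it by stride-k slicing,
-- instead of A's single interleaved accumulate-and-flush loop (alternative decomposition, same cost).

-- ===== PORT A =====
def key_to_matrix (key_text : String) (key_length : Int) : List (List Int) :=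
  let truncated : List Char := PySem.List.slice key_text.toList none (some (key_length ^ 2))
  let st := (PySem.Chars.upper truncated).foldl
    (fun (st : List (List Int) × List Int) i =>
      let sr := st.2 ++ [((i.toNat : Int) - 65)]
      if (sr.length : Int) = key_length then (st.1 ++ [sr], ([] : List Int)) else (st.1, sr))
    ([], [])
  st.1

-- ===== PORT B =====
def key_to_matrix_alt (key_text : String) (key_length : Int) : List (List Int) :=
  if key_length ≤ 0 then []
  else
    let codes : List Int :=
      (PySem.Chars.upper (PySem.List.slice key_text.toList none (some (key_length ^ 2)))).map
        (fun c => (c.toNat : Int) - 65)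
    (PySem.List.pyRange 0 ((codes.length : Int) - key_length + 1) key_length).map
      (fun i => PySem.List.slice codes (some i) (some (i + key_length)))

-- ===== PRECONDITION & SPEC =====
def Spec_key_to_matrix (key_text : String) (key_length : Int) (out : List (List Int)) : Prop := out = key_to_matrix_alt key_text key_length
instance (key_text : String) (key_length : Int) (out : List (List Int)) : Decidable (Spec_key_to_matrix key_text key_length out) := by unfold Spec_key_to_matrix; infer_instance

-- ===== CLAIM (what is proved, stated in full; the proofs are below) =====
def Claim_equal_key_to_matrix : Prop := ∀ (key_text : String) (key_length : Int), Dom_key_to_matrix key_text key_length → Spec_key_to_matrix key_text key_length (key_to_matrix key_text key_length)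

-- ===== LEMMAS AND PROOFS =====

-- A's loop step on the already-mapped code values
def pvStepFun (kl : Int) (st : List (List Int) × List Int) (v : Int) : List (List Int) × List Int :=
  if ((st.2 ++ [v]).length : Int) = kl then (st.1 ++ [st.2 ++ [v]], ([] : List Int)) else (st.1, st.2 ++ [v])

-- consecutive full length-k chunks of a list (proof-side characterisation)
def pvChunks {α : Type} (k : Nat) (l : List α) : List (List α) :=
  if h : 0 < k ∧ k ≤ l.length then l.take k :: pvChunks k (l.drop k) else []
termination_by l.length
decreasing_by simp; omega

lemma pvChunks_small {α : Type} (k : Nat) (l : List α) (hlt : l.length < k) : pvChunks k l = [] := by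
  rw [pvChunks]; rw [dif_neg]; omega

lemma pvChunks_step {α : Type} (k : Nat) (l : List α) (hk : 0 < k) (h : k ≤ l.length) :
    pvChunks k l = l.take k :: pvChunks k (l.drop k) := by
  rw [pvChunks]; rw [dif_pos ⟨hk, h⟩]

lemma A_fold (k : Nat) (hk : 0 < k) :
    ∀ (cs : List Int) (m : List (List Int)) (sr : List Int), sr.length < k →
      (cs.foldl (pvStepFun (k : Int)) (m, sr)).1 = m ++ pvChunks k (sr ++ cs) := by
  intro cs
  induction cs with
  | nil =>
    intro m sr hsr
    simp [pvChunks_small k sr hsr]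
  | cons v t ih =>
    intro m sr hsr
    simp only [List.foldl_cons]
    by_cases hlen : (sr ++ [v]).length = k
    · have hstep : pvStepFun (k : Int) (m, sr) v = (m ++ [sr ++ [v]], ([] : List Int)) := by
        simp [pvStepFun, hlen]
      rw [hstep, ih (m ++ [sr ++ [v]]) [] hk]
      have h1 : sr ++ v :: t = (sr ++ [v]) ++ t := by simp
      have hk2 : k ≤ ((sr ++ [v]) ++ t).length := by
        simp only [List.length_append, List.length_cons, List.length_nil] at hlen ⊢
        omega
      rw [h1, pvChunks_step k ((sr ++ [v]) ++ t) hk hk2]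
      rw [List.take_left' hlen, List.drop_left' hlen]
      simp
    · have hstep : pvStepFun (k : Int) (m, sr) v = (m, sr ++ [v]) := by
        simp only [List.length_append, List.length_cons, List.length_nil] at hlen
        simp [pvStepFun]
        omega
      rw [hstep, ih m (sr ++ [v]) (by simp at hlen ⊢; omega)]
      simp
  
lemma A_fold_nonpos (kl : Int) (h : kl ≤ 0) :
    ∀ (cs : List Int) (m : List (List Int)) (sr : List Int),
      (cs.foldl (pvStepFun kl) (m, sr)).1 = m := by
  intro cs
  induction cs with
  | nil => intro m sr; rfl
  | cons v t ih =>
    intro m sr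
    simp only [List.foldl_cons]
    have hstep : pvStepFun kl (m, sr) v = (m, sr ++ [v]) := by
      simp [pvStepFun]; intro hc; exfalso; omega
    rw [hstep, ih]

lemma B_range (k : Nat) (hk : 0 < k) (n : Nat) :
    PySem.List.pyRange 0 ((n : Int) - (k : Int) + 1) (k : Int)
      = (List.range (n / k)).map (fun j => ((k * j : Nat) : Int)) := by
  rw [PySem.List.pyRange_of_pos 0 ((n : Int) - (k : Int) + 1) (by exact_mod_cast hk)]
  by_cases h : k ≤ n
  · have hlt : (0 : Int) < (n : Int) - (k : Int) + 1 := by omega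
    rw [if_pos hlt]
    have harg : (n : Int) - (k : Int) + 1 - 0 + (k : Int) - 1 = (n : Int) := by ring
    rw [harg]
    have hdiv : (n : Int) / (k : Int) = ((n / k : Nat) : Int) := Int.ofNat_ediv_ofNat
    rw [hdiv, Int.toNat_natCast]
    apply List.map_congr_left
    intro j _
    push_cast
    ring
  · have hlt : ¬ (0 : Int) < (n : Int) - (k : Int) + 1 := by omega
    rw [if_neg hlt]
    have : n / k = 0 := Nat.div_eq_of_lt (by omega)
    simp [this]

lemma chunks_eq (k : Nat) (hk : 0 < k) :
    ∀ (n : Nat) (cs : List Int), cs.length ≤ n →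
      (List.range (cs.length / k)).map (fun j => (cs.drop (k * j)).take k) = pvChunks k cs := by
  intro n
  induction n with
  | zero =>
    intro cs hle
    have h0 : cs.length = 0 := by omega
    simp [h0, Nat.zero_div, pvChunks_small k cs (by omega)]
  | succ n ih =>
    intro cs hle
    by_cases h : k ≤ cs.length
    · have hdiv : cs.length / k = (cs.drop k).length / k + 1 := by
        rw [List.length_drop, Nat.div_eq_sub_div hk h]
      rw [hdiv, List.range_succ_eq_map]
      simp only [List.map_cons, List.map_map]
      rw [pvChunks_step k cs hk h]
      have hhead : (cs.drop (k * 0)).take k = cs.take k := by simp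
      rw [hhead]
      have htail : ∀ j ∈ List.range ((cs.drop k).length / k),
          ((fun j => (cs.drop (k * j)).take k) ∘ Nat.succ) j
            = (fun j => (((cs.drop k).drop (k * j)).take k)) j := by
        intro j _
        simp only [Function.comp_apply, List.drop_drop]
        congr 1
        rw [Nat.mul_succ]
        congr 1
        exact Nat.add_comm _ _
      rw [List.map_congr_left htail]
      rw [ih (cs.drop k) (by simp [List.length_drop]; omega)]
    · have hlt : cs.length < k := by omega
      simp [Nat.div_eq_of_lt hlt, pvChunks_small k cs hlt]

-- ===== VERDICT (by name: the statement is the Claim_ definition above) =====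
theorem key_to_matrix_spec : Claim_equal_key_to_matrix := by
  intro key_text key_length _
  unfold Spec_key_to_matrix key_to_matrix key_to_matrix_alt
  simp only []
  have hfun : ∀ kl : Int, (fun (st : List (List Int) × List Int) (i : Char) =>
      if ((st.2 ++ [((i.toNat : Int) - 65)]).length : Int) = kl
      then (st.1 ++ [st.2 ++ [((i.toNat : Int) - 65)]], ([] : List Int))
      else (st.1, st.2 ++ [((i.toNat : Int) - 65)]))
      = (fun st i => pvStepFun kl st ((i.toNat : Int) - 65)) := fun _ => rfl
  by_cases hk : key_length ≤ 0
  · rw [if_pos hk, hfun key_length]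
    rw [← List.foldl_map (f := fun c : Char => ((c.toNat : Int) - 65)) (g := pvStepFun key_length)]
    exact A_fold_nonpos key_length hk _ [] []
  · rw [if_neg hk]
    obtain ⟨k, hkk⟩ : ∃ k : Nat, key_length = (k : Int) := ⟨key_length.toNat, by omega⟩
    have hkpos : 0 < k := by omega
    clear hk
    subst hkk
    set codes : List Int :=
      (PySem.Chars.upper (PySem.List.slice key_text.toList none (some ((k : Int) ^ 2)))).map
        (fun c => (c.toNat : Int) - 65) with hcodes
    rw [hfun (k : Int)]
    rw [← List.foldl_map (f := fun c : Char => ((c.toNat : Int) - 65)) (g := pvStepFun (k : Int))]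
    rw [← hcodes]
    rw [A_fold k hkpos codes [] [] hkpos]
    simp only [List.nil_append]
    rw [show ((codes.length : Int)) = ((codes.length : Nat) : Int) from rfl]
    rw [B_range k hkpos codes.length, List.map_map]
    rw [← chunks_eq k hkpos codes.length codes le_rfl]
    apply List.map_congr_left
    intro j hj
    simp only [Function.comp_apply]
    rw [PySem.List.slice_toNat codes (by positivity) (by positivity)]
    have h1 : ((k * j : Nat) : Int).toNat = k * j := Int.toNat_natCast _
    have h2 : (((k * j : Nat) : Int) + (k : Int)).toNat = k * j + k := by omega
    rw [h1, h2]
    congr 1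
    exact (Nat.add_sub_cancel_left (k * j) k).symm
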